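-- pv_equiv track=rewrite | github.com/mirarzf/aoc2022 | pysolutions/day08/day08.py | getHVvision
-- ===== SOURCE A (Python) =====
-- def getVisionFromSide(treeGrid, side:str, row:int):
--     if side == "left" or side == "right":
--         treeRow = treeGrid[row]
--         nline = len(treeRow)
--     else: # side == "up" or side == "down"
--         treeRow = [treeline[row] for treeline in treeGrid]
--         nline = len(treeRow)
--
--     visionFromSide = [True for i in range(nline)]
--
--     if side == "left" or side == "up":
--         previousTree = treeRow[0]
--         currTree = 0
--         for i in range(1, nline-1):
--             currTree = treeRow[i]
--             if previousTree >= currTree: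
--                 visionFromSide[i] = False
--             else:
--                 previousTree = currTree
--
--     if side == "right" or side == "down":
--         previousTree = treeRow[-1]
--         currTree = 0
--         for i in range(nline-2, -1, -1):
--             currTree = treeRow[i]
--             if previousTree >= currTree:
--                 visionFromSide[i] = False
--             else:
--                 previousTree = currTree
--
--     return visionFromSide
--
-- def getHVvision(treeGrid, side:str, row:int):
--     if side == "horizontal":
--         visionFromLeft = getVisionFromSide(treeGrid, "left", row)
--         visionFromRight = getVisionFromSide(treeGrid, "right", row)
--         HVvision = [visionFromRight[i] or visionFromLeft[i] for i in range(len(treeGrid[0]))]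
--
--     else: # side == "vertical":
--         visionFromUp = getVisionFromSide(treeGrid, "up", row)
--         visionFromDown = getVisionFromSide(treeGrid, "down", row)
--         HVvision = [visionFromUp[i] or visionFromDown[i] for i in range(len(treeGrid))]
--
--     return HVvision
-- ===== SOURCE B (Python) =====
-- def getHVvision(treeGrid, side: str, row: int):
--     if side == "horizontal":
--         line = treeGrid[row]
--         n = len(treeGrid[0])
--     else:
--         line = [treeline[row] for treeline in treeGrid]
--         n = len(treeGrid)
--     return [all(line[i] > t for t in line[:i]) or all(line[i] > t for t in line[i + 1:])
--             for i in range(n)]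
-- ===== Notes on version B (the rewrite author's own statement) =====
-- stated objective: simpler
-- what changed: B replaces A's helper with its two stateful running-maximum passes and per-side boolean arrays by a single comprehension that decides each tree's visibility directly with an all() scan of its left and right neighbours.
import Mathlib
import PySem

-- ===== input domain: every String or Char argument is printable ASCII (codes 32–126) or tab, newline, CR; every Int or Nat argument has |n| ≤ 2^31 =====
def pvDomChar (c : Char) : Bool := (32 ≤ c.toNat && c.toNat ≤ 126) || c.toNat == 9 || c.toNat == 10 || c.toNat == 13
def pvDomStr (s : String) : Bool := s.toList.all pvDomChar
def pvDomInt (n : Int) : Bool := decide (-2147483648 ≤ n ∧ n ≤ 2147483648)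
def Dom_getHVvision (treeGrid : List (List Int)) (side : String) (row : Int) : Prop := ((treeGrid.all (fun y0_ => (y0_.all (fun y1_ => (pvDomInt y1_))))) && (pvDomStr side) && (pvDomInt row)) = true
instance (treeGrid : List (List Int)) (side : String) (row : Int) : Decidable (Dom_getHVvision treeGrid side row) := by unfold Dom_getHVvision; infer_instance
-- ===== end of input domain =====

-- B replaces A's two stateful running-maximum passes by a direct all()-scan of each tree's
-- left and right neighbours: simpler, same values (quadratic instead of linear).

-- ===== PORT A =====
-- the repeated loop body 'currTree = treeRow[i]; if previousTree >= currTree: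
-- visionFromSide[i] = False; else: previousTree = currTree' of getVisionFromSide
def pvStep (treeRow : List Int) (st : Int × List Bool) (i : Int) : Int × List Bool :=
  let currTree := PySem.List.pyGetD treeRow i 0
  if st.1 ≥ currTree then (st.1, PySem.List.pySetD st.2 i false) else (currTree, st.2)

def getVisionFromSide (treeGrid : List (List Int)) (side : String) (row : Int) : List Bool :=
  let treeRow : List Int :=
    if side == "left" || side == "right" then
      (PySem.List.pyGet? treeGrid row).getD []
    else
      treeGrid.map (fun treeline => (PySem.List.pyGet? treeline row).getD 0)
  let nline : Int := (treeRow.length : Int)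
  let vision0 : List Bool := List.replicate treeRow.length true
  let vision1 : List Bool :=
    if side == "left" || side == "up" then
      ((PySem.List.pyRange 1 (nline - 1) 1).foldl (pvStep treeRow)
        (PySem.List.pyGetD treeRow 0 0, vision0)).2
    else vision0
  let vision2 : List Bool :=
    if side == "right" || side == "down" then
      ((PySem.List.pyRange (nline - 2) (-1) (-1)).foldl (pvStep treeRow)
        (PySem.List.pyGetD treeRow (-1) 0, vision1)).2
    else vision1
  vision2

def getHVvision (treeGrid : List (List Int)) (side : String) (row : Int) : List Bool :=
  if side == "horizontal" then
    let visionFromLeft := getVisionFromSide treeGrid "left" row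
    let visionFromRight := getVisionFromSide treeGrid "right" row
    (PySem.List.pyRange 0 (((treeGrid.headD []).length : Int)) 1).map
      (fun i => PySem.List.pyGetD visionFromRight i false || PySem.List.pyGetD visionFromLeft i false)
  else
    let visionFromUp := getVisionFromSide treeGrid "up" row
    let visionFromDown := getVisionFromSide treeGrid "down" row
    (PySem.List.pyRange 0 ((treeGrid.length : Int)) 1).map
      (fun i => PySem.List.pyGetD visionFromUp i false || PySem.List.pyGetD visionFromDown i false)

-- ===== PORT B =====
def getHVvision_alt (treeGrid : List (List Int)) (side : String) (row : Int) : List Bool :=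
  let line : List Int :=
    if side == "horizontal" then (PySem.List.pyGet? treeGrid row).getD []
    else treeGrid.map (fun treeline => (PySem.List.pyGet? treeline row).getD 0)
  let n : Nat := if side == "horizontal" then (treeGrid.headD []).length else treeGrid.length
  (List.range n).map (fun (i : Nat) =>
    let x := PySem.List.pyGetD line (i : Int) 0
    ((line.take i).all (fun t => decide (x > t))) || ((line.drop (i + 1)).all (fun t => decide (x > t))))

-- ===== PRECONDITION & SPEC =====
-- Pre_ excludes exactly the inputs on which A raises IndexError: an out-of-range row index,
-- an empty selected row (treeRow[0]), a first row longer than the selected row (the final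
-- comprehension indexes the vision lists up to len(treeGrid[0])), and — off the horizontal
-- side — an empty grid or a grid row too short for the column index.
def Pre_getHVvision (treeGrid : List (List Int)) (side : String) (row : Int) : Prop :=
  if side = "horizontal" then
    PySem.Raise.InRange treeGrid.length row ∧
    ((PySem.List.pyGet? treeGrid row).getD []) ≠ [] ∧
    (treeGrid.headD []).length ≤ ((PySem.List.pyGet? treeGrid row).getD []).length
  else
    treeGrid ≠ [] ∧ ∀ l ∈ treeGrid, PySem.Raise.InRange l.length row
instance (treeGrid : List (List Int)) (side : String) (row : Int) : Decidable (Pre_getHVvision treeGrid side row) := by unfold Pre_getHVvision; infer_instance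

def pvWitness_getHVvision : List (List Int) × String × Int := ([[3, 0, 3], [2, 5, 1], [6, 5, 3]], "horizontal", 1)

def Spec_getHVvision (treeGrid : List (List Int)) (side : String) (row : Int) (out : List Bool) : Prop := out = getHVvision_alt treeGrid side row
instance (treeGrid : List (List Int)) (side : String) (row : Int) (out : List Bool) : Decidable (Spec_getHVvision treeGrid side row out) := by unfold Spec_getHVvision; infer_instance

-- ===== CLAIM (what is proved, stated in full; the proofs are below) =====
def Claim_equal_getHVvision : Prop := ∀ (treeGrid : List (List Int)) (side : String) (row : Int), Dom_getHVvision treeGrid side row → Pre_getHVvision treeGrid side row → Spec_getHVvision treeGrid side row (getHVvision treeGrid side row)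

-- ===== LEMMAS AND PROOFS =====

-- A's left-to-right pass and right-to-left pass of getVisionFromSide, applied to an
-- already-extracted line (abbreviations for the proofs; the ports do not use them)
def leftArr (line : List Int) : List Bool :=
  ((PySem.List.pyRange 1 ((line.length : Int) - 1) 1).foldl (pvStep line)
    (PySem.List.pyGetD line 0 0, List.replicate line.length true)).2

def rightArr (line : List Int) : List Bool :=
  ((PySem.List.pyRange ((line.length : Int) - 2) (-1) (-1)).foldl (pvStep line)
    (PySem.List.pyGetD line (-1) 0, List.replicate line.length true)).2

-- invariant of A's ascending pass: the accumulator is a running maximum of the prefix and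
-- entry j holds iff tree j beats every tree to its left (endpoints untouched)
theorem left_inv (line : List Int) (k : Nat) (hk : k < line.length) :
    ((PySem.List.pyRange 1 (1 + (k : Int)) 1).foldl (pvStep line)
        (PySem.List.pyGetD line 0 0, List.replicate line.length true)).1 ∈ line.take (k + 1) ∧
    (∀ t ∈ line.take (k + 1), t ≤ ((PySem.List.pyRange 1 (1 + (k : Int)) 1).foldl (pvStep line)
        (PySem.List.pyGetD line 0 0, List.replicate line.length true)).1) ∧
    (((PySem.List.pyRange 1 (1 + (k : Int)) 1).foldl (pvStep line)
        (PySem.List.pyGetD line 0 0, List.replicate line.length true)).2.length = line.length) ∧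
    (∀ j, j < line.length →
      ((PySem.List.pyRange 1 (1 + (k : Int)) 1).foldl (pvStep line)
        (PySem.List.pyGetD line 0 0, List.replicate line.length true)).2.getD j true =
      if 1 ≤ j ∧ j ≤ k then (line.take j).all (fun t => decide (line.getD j 0 > t)) else true) := by
  induction k with
  | zero =>
    rw [show ((1 : Int) + (0:Nat)) = 1 by norm_num, PySem.List.pyRange_one_eq_nil le_rfl]
    simp only [List.foldl_nil]
    obtain ⟨a, t, rfl⟩ : ∃ a t, line = a :: t := by
      cases line with
      | nil => simp at hk
      | cons a t => exact ⟨a, t, rfl⟩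
    refine ⟨by simp [PySem.List.pyGetD_zero], by simp [PySem.List.pyGetD_zero], by simp, ?_⟩
    intro j hj
    rw [if_neg (by omega)]
    simp
  | succ k ih =>
    have hk' : k < line.length := by omega
    obtain ⟨ih1, ih2, ih3, ih4⟩ := ih hk'
    have hsplit : PySem.List.pyRange 1 (1 + ((k+1 : Nat) : Int)) 1
        = PySem.List.pyRange 1 (1 + (k : Int)) 1 ++ [((k+1 : Nat) : Int)] := by
      push_cast
      rw [show (1 : Int) + ((k : Int) + 1) = (1 + (k : Int)) + 1 by ring,
        PySem.List.pyRange_one_succ_right (by omega)]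
      norm_num; ring_nf
    rw [hsplit, List.foldl_append, List.foldl_cons, List.foldl_nil]
    set st := (PySem.List.pyRange 1 (1 + (k : Int)) 1).foldl (pvStep line)
        (PySem.List.pyGetD line 0 0, List.replicate line.length true) with hst
    have hcurr : PySem.List.pyGetD line ((k+1 : Nat) : Int) 0 = line.getD (k+1) 0 :=
      PySem.List.pyGetD_natCast line (k+1) 0
    have htake : line.take (k+1+1) = line.take (k+1) ++ [line.getD (k+1) 0] := by
      rw [List.getD_eq_getElem _ _ hk]
      simp [List.take_succ, List.getElem?_eq_getElem hk]
    rw [pvStep]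
    simp only [hcurr]
    split_ifs with h
    · -- previousTree >= currTree : set index k+1 to false
      have hset : ∀ (v : List Bool), v.length = line.length →
          PySem.List.pySetD v ((k : Int) + 1) false = v.set (k+1) false := by
        intro v hv
        rw [PySem.List.pySetD, show ((k:Int) + 1) = ((k+1 : Nat) : Int) by push_cast; ring,
          PySem.List.pySet?_natCast]
        · rfl
        · omega
      rw [show ((PySem.List.pySetD st.2 (↑(k+1) : Int) false : List Bool)) = st.2.set (k+1) false by
        rw [show ((↑(k+1) : Int)) = (k : Int) + 1 by push_cast; ring]; exact hset st.2 ih3]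
      refine ⟨?_, ?_, by simpa using ih3, ?_⟩
      · exact (List.take_prefix_take_left (by omega)).subset ih1
      · intro t ht
        rw [htake] at ht
        rcases List.mem_append.mp ht with h' | h'
        · exact ih2 t h'
        · rw [List.mem_singleton] at h'; subst h'; exact h
      · intro j hj
        by_cases hjk : j = k + 1
        · subst hjk
          rw [List.getD_eq_getElem _ _ (by simpa [ih3] using hk)]
          rw [if_pos (by omega)]
          simp only [List.getElem_set_self]
          symm
          rw [List.all_eq_false]
          refine ⟨st.1, ih1, ?_⟩
          simpa using h
        · have : (st.2.set (k+1) false).getD j true = st.2.getD j true := by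
            by_cases hjl : j < st.2.length
            · rw [List.getD_eq_getElem _ _ (by simpa using hjl),
                List.getD_eq_getElem _ _ hjl, List.getElem_set_ne (by omega)]
            · rw [List.getD_eq_default _ _ (by simpa using hjl), List.getD_eq_default _ _ (by omega)]
          rw [this, ih4 j hj]
          have : (1 ≤ j ∧ j ≤ k) ↔ (1 ≤ j ∧ j ≤ k + 1) := by omega
          rw [if_congr this rfl rfl]
    · -- previousTree < currTree : previous becomes current
      push_neg at h
      refine ⟨?_, ?_, ih3, ?_⟩
      · rw [htake]; simp
      · intro t ht
        rw [htake] at ht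
        rcases List.mem_append.mp ht with h' | h'
        · exact le_of_lt (lt_of_le_of_lt (ih2 t h') h)
        · rw [List.mem_singleton] at h'; subst h'; exact le_rfl
      · intro j hj
        by_cases hjk : j = k + 1
        · subst hjk
          rw [ih4 _ hj, if_neg (by omega), if_pos (by omega)]
          symm
          rw [List.all_eq_true]
          intro t ht
          exact decide_eq_true (lt_of_le_of_lt (ih2 t ht) h)
        · rw [ih4 j hj]
          have : (1 ≤ j ∧ j ≤ k) ↔ (1 ≤ j ∧ j ≤ k + 1) := by omega
          rw [if_congr this rfl rfl]

-- invariant of A's descending pass: the accumulator is a running maximum of the suffix and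
-- entry j holds iff tree j beats every tree to its right (untouched entries keep v0)
theorem right_inv (line : List Int) : ∀ (m : Nat) (_hm : m ≤ line.length)
    (p : Int) (v0 : List Bool) (hlen : v0.length = line.length)
    (hp1 : p ∈ line.drop m) (hp2 : ∀ t ∈ line.drop m, t ≤ p)
    (hv0 : ∀ j, j < m → v0.getD j true = true),
    (((PySem.List.pyRange ((m : Int) - 1) (-1) (-1)).foldl (pvStep line) (p, v0)).2.length = line.length) ∧
    (∀ j, j < line.length →
      ((PySem.List.pyRange ((m : Int) - 1) (-1) (-1)).foldl (pvStep line) (p, v0)).2.getD j true =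
      if j < m then (line.drop (j + 1)).all (fun t => decide (line.getD j 0 > t)) else v0.getD j true) := by
  intro m
  induction m with
  | zero =>
    intro _hm p v0 hlen hp1 hp2 hv0
    rw [show ((0:Nat) : Int) - 1 = -1 by norm_num, PySem.List.pyRange_neg_one_eq_nil le_rfl]
    exact ⟨hlen, fun j hj => by rw [List.foldl_nil, if_neg (by omega)]⟩
  | succ m ih =>
    intro _hm p v0 hlen hp1 hp2 hv0
    have hmlt : m + 1 < line.length := by
      by_contra hcon
      rw [List.drop_eq_nil_of_le (by omega)] at hp1
      simp at hp1
    have hdrop : line.drop m = line.getD m 0 :: line.drop (m + 1) := by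
      rw [List.getD_eq_getElem _ _ (by omega)]
      exact List.drop_eq_getElem_cons (by omega)
    rw [show ((m + 1 : Nat) : Int) - 1 = (m : Int) by push_cast; ring,
      PySem.List.pyRange_neg_one_cons (by omega), List.foldl_cons]
    rw [pvStep]
    simp only [PySem.List.pyGetD_natCast]
    split_ifs with h
    · -- previousTree >= currTree : set index m to false
      rw [show ((PySem.List.pySetD v0 (↑m : Int) false : List Bool)) = v0.set m false by
        rw [PySem.List.pySetD, PySem.List.pySet?_natCast]
        · rfl
        · omega]
      have hset_len : (v0.set m false).length = line.length := by simpa using hlen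
      obtain ⟨c1, c2⟩ := ih (by omega) p (v0.set m false) hset_len
        (by rw [hdrop]; exact List.mem_cons_of_mem _ hp1)
        (by rw [hdrop]
            intro t ht
            rcases List.mem_cons.mp ht with heq | ht'
            · subst heq; exact h
            · exact hp2 t ht')
        (by intro j hj
            rw [List.getD_eq_getElem _ _ (by rw [List.length_set]; omega),
              List.getElem_set_ne (by omega)]
            have hvj := hv0 j (by omega)
            rwa [List.getD_eq_getElem _ _ (by omega)] at hvj)
      refine ⟨c1, ?_⟩
      intro j hj
      rw [c2 j hj]
      by_cases hjm : j = m
      · subst hjm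
        rw [if_neg (by omega), if_pos (by omega)]
        rw [List.getD_eq_getElem _ _ (by omega), List.getElem_set_self (by omega)]
        symm
        rw [List.all_eq_false]
        exact ⟨p, hp1, by simpa using h⟩
      · by_cases hjm' : j < m
        · rw [if_pos hjm', if_pos (by omega)]
        · rw [if_neg (by omega), if_neg (by omega),
            List.getD_eq_getElem _ _ (by omega), List.getD_eq_getElem _ _ (by omega),
            List.getElem_set_ne (by omega)]
    · -- previousTree < currTree
      push_neg at h
      obtain ⟨c1, c2⟩ := ih (by omega) (line.getD m 0) v0 hlen
        (by rw [hdrop]; exact List.mem_cons_self)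
        (by rw [hdrop]
            intro t ht
            rcases List.mem_cons.mp ht with heq | ht'
            · subst heq; exact le_rfl
            · exact le_of_lt (lt_of_le_of_lt (hp2 t ht') h))
        (by intro j hj; exact hv0 j (by omega))
      refine ⟨c1, ?_⟩
      intro j hj
      rw [c2 j hj]
      by_cases hjm : j = m
      · subst hjm
        rw [if_neg (by omega), if_pos (by omega), hv0 j (by omega)]
        symm
        rw [List.all_eq_true]
        intro t ht
        exact decide_eq_true (lt_of_le_of_lt (hp2 t ht) h)
      · by_cases hjm' : j < m
        · rw [if_pos hjm', if_pos (by omega)]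
        · rw [if_neg (by omega), if_neg (by omega)]

theorem length_pySet?_eq_some (xs : List Bool) (i : Int) (v : List Bool)
    (h : PySem.List.pySet? xs i false = some v) : v.length = xs.length := by
  unfold PySem.List.pySet? at h
  cases hq : PySem.List.pyIdx? xs.length i with
  | none => rw [hq] at h; simp at h
  | some k =>
    rw [hq] at h
    simp only [Option.map_some, Option.some.injEq] at h
    subst h
    simp

theorem pvStep_len (line : List Int) (st : Int × List Bool) (i : Int) :
    (pvStep line st i).2.length = st.2.length := by
  rw [pvStep]
  split_ifs with h
  · rw [PySem.List.pySetD]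
    cases hq : PySem.List.pySet? st.2 i false with
    | none => simp
    | some v => simpa using length_pySet?_eq_some st.2 i v hq
  · rfl

theorem foldl_pvStep_len (line : List Int) (l : List Int) (st : Int × List Bool) :
    (l.foldl (pvStep line) st).2.length = st.2.length := by
  induction l generalizing st with
  | nil => rfl
  | cons x xs ih => rw [List.foldl_cons, ih, pvStep_len]

theorem leftArr_length (line : List Int) : (leftArr line).length = line.length := by
  rw [leftArr, foldl_pvStep_len]; simp

theorem rightArr_length (line : List Int) : (rightArr line).length = line.length := by
  rw [rightArr, foldl_pvStep_len]; simp

theorem leftArr_getD (line : List Int) (hne : line ≠ []) : ∀ j, j < line.length →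
    (leftArr line).getD j true =
      if 1 ≤ j ∧ j + 1 < line.length then
        (line.take j).all (fun t => decide (line.getD j 0 > t))
      else true := by
  intro j hj
  rcases Nat.lt_or_ge 1 line.length with h2 | h1
  · have hcast : ((line.length : Int) - 1) = 1 + ((line.length - 2 : Nat) : Int) := by omega
    have hchar := (left_inv line (line.length - 2) (by omega)).2.2.2 j hj
    rw [leftArr, hcast, hchar]
    have : (1 ≤ j ∧ j ≤ line.length - 2) ↔ (1 ≤ j ∧ j + 1 < line.length) := by omega
    rw [if_congr this rfl rfl]
  · have hpos : 0 < line.length := List.length_pos_of_ne_nil hne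
    rw [leftArr, show ((line.length : Int) - 1) = 0 by omega,
      PySem.List.pyRange_one_eq_nil (by norm_num), List.foldl_nil, if_neg (by omega)]
    simp

theorem rightArr_getD (line : List Int) (hne : line ≠ []) : ∀ j, j < line.length →
    (rightArr line).getD j true =
      if j + 1 < line.length then
        (line.drop (j + 1)).all (fun t => decide (line.getD j 0 > t))
      else true := by
  intro j hj
  have hpos : 0 < line.length := List.length_pos_of_ne_nil hne
  have hlast : PySem.List.pyGetD line (-1) 0 = line.getLast hne := PySem.List.pyGetD_neg_one line 0 hne
  have hdrop : line.drop (line.length - 1) = [line.getLast hne] := List.drop_length_sub_one hne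
  have hchar := (right_inv line (line.length - 1) (by omega) (PySem.List.pyGetD line (-1) 0)
      (List.replicate line.length true) (by simp)
      (by rw [hlast, hdrop]; exact List.mem_singleton_self _)
      (by rw [hlast, hdrop]
          intro t ht
          rw [List.mem_singleton] at ht
          subst ht; exact le_rfl)
      (by intro j' hj'; simp)).2 j hj
  rw [rightArr, show ((line.length : Int) - 2) = ((line.length - 1 : Nat) : Int) - 1 by omega, hchar]
  by_cases hc : j + 1 < line.length
  · rw [if_pos (by omega), if_pos hc]
  · rw [if_neg (by omega), if_neg hc]; simp

theorem visSide_left (treeGrid : List (List Int)) (row : Int) :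
    getVisionFromSide treeGrid "left" row = leftArr ((PySem.List.pyGet? treeGrid row).getD []) := by
  rfl

theorem visSide_right (treeGrid : List (List Int)) (row : Int) :
    getVisionFromSide treeGrid "right" row = rightArr ((PySem.List.pyGet? treeGrid row).getD []) := by
  rfl

theorem visSide_up (treeGrid : List (List Int)) (row : Int) :
    getVisionFromSide treeGrid "up" row
      = leftArr (treeGrid.map (fun treeline => (PySem.List.pyGet? treeline row).getD 0)) := by
  rfl

theorem visSide_down (treeGrid : List (List Int)) (row : Int) :
    getVisionFromSide treeGrid "down" row
      = rightArr (treeGrid.map (fun treeline => (PySem.List.pyGet? treeline row).getD 0)) := by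
  rfl

-- the element-wise agreement of A's or-combination with B's comprehension, on any line
-- (combine: right-pass first, as in A's horizontal branch; combine': up-pass first)
theorem combine (line : List Int) (hne : line ≠ []) (n' : Nat) (hn' : n' ≤ line.length) :
    (PySem.List.pyRange 0 (n' : Int) 1).map
        (fun i => PySem.List.pyGetD (rightArr line) i false || PySem.List.pyGetD (leftArr line) i false)
      = (List.range n').map (fun (i : Nat) =>
          ((line.take i).all (fun t => decide (PySem.List.pyGetD line (i : Int) 0 > t))) ||
          ((line.drop (i + 1)).all (fun t => decide (PySem.List.pyGetD line (i : Int) 0 > t)))) := by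
  rw [PySem.List.pyRange_zero_natCast, List.map_map]
  apply List.map_congr_left
  intro i hi
  have hi' : i < line.length := by have := List.mem_range.mp hi; omega
  have hL := leftArr_getD line hne i hi'
  have hR := rightArr_getD line hne i hi'
  rw [List.getD_eq_getElem _ _ (by rw [leftArr_length]; omega)] at hL
  rw [List.getD_eq_getElem _ _ (by rw [rightArr_length]; omega)] at hR
  simp only [Function.comp_apply, PySem.List.pyGetD_natCast,
    List.getD_eq_getElem (leftArr line) false (by rw [leftArr_length]; omega),
    List.getD_eq_getElem (rightArr line) false (by rw [rightArr_length]; omega)]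
  rw [hL, hR]
  by_cases hc : i + 1 < line.length
  · rw [if_pos hc]
    by_cases h0 : 1 ≤ i
    · rw [if_pos ⟨h0, hc⟩, Bool.or_comm]
    · have : i = 0 := by omega
      subst this
      rw [if_neg (by omega)]
      simp
  · rw [if_neg hc, if_neg (by omega), List.drop_eq_nil_of_le (by omega)]
    simp

theorem combine' (line : List Int) (hne : line ≠ []) (n' : Nat) (hn' : n' ≤ line.length) :
    (PySem.List.pyRange 0 (n' : Int) 1).map
        (fun i => PySem.List.pyGetD (leftArr line) i false || PySem.List.pyGetD (rightArr line) i false)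
      = (List.range n').map (fun (i : Nat) =>
          ((line.take i).all (fun t => decide (PySem.List.pyGetD line (i : Int) 0 > t))) ||
          ((line.drop (i + 1)).all (fun t => decide (PySem.List.pyGetD line (i : Int) 0 > t)))) := by
  rw [← combine line hne n' hn']
  exact List.map_congr_left (fun i _ => Bool.or_comm _ _)

-- ===== VERDICT (by name: the statement is the Claim_ definition above) =====
theorem getHVvision_spec : Claim_equal_getHVvision := by
  intro treeGrid side row _hdom hpre
  unfold Spec_getHVvision
  unfold Pre_getHVvision at hpre
  by_cases hs : side = "horizontal"
  · subst hs
    rw [if_pos rfl] at hpre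
    obtain ⟨_hin, hne, hle⟩ := hpre
    show getHVvision treeGrid "horizontal" row = getHVvision_alt treeGrid "horizontal" row
    rw [getHVvision, getHVvision_alt, if_pos (by rfl)]
    simp only [beq_self_eq_true, if_pos, visSide_left, visSide_right]
    exact combine _ hne _ hle
  · rw [if_neg hs] at hpre
    obtain ⟨hgne, _hrows⟩ := hpre
    have hbeq : (side == "horizontal") = false := by
      simpa using hs
    have hlen : treeGrid.length
        = (treeGrid.map (fun treeline => (PySem.List.pyGet? treeline row).getD 0)).length := by
      simp
    have hne : (treeGrid.map (fun treeline => (PySem.List.pyGet? treeline row).getD 0)) ≠ [] := by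
      simpa using hgne
    rw [getHVvision, getHVvision_alt, hbeq]
    simp only [Bool.false_eq_true, if_false, visSide_up, visSide_down]
    rw [show ((treeGrid.length : Int))
        = (((treeGrid.map (fun treeline => (PySem.List.pyGet? treeline row).getD 0)).length : Nat) : Int) by
      simp]
    rw [show (treeGrid.length)
        = ((treeGrid.map (fun treeline => (PySem.List.pyGet? treeline row).getD 0)).length) from hlen]
    exact combine' _ hne _ le_rfl
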